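-- pv_equiv track=rewrite | github.com/StrataSource/sdk_tools | scripts/get-polyhaven-textures.py | get_materials_subdir
-- ===== SOURCE A (Python) =====
-- def get_materials_subdir(path: str) -> str | None:
-- 	path = path.replace('\\', '/')
-- 	comps = path.split('/')
-- 	comps.reverse()
-- 	r = []
-- 	for p in comps:
-- 		if p != 'materials':
-- 			r.insert(0, p)
-- 		else:
-- 			break
-- 	if len(r) < len(comps):
-- 		return '/'.join(r)
-- 	return None
-- ===== SOURCE B (Python) =====
-- def get_materials_subdir(path: str) -> str | None:
--     comps = path.replace('\\', '/').split('/')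
--     last = -1
--     for i, c in enumerate(comps):
--         if c == 'materials':
--             last = i
--     if last == -1:
--         return None
--     return '/'.join(comps[last + 1:])
-- ===== Notes on version B (the rewrite author's own statement) =====
-- stated objective: simpler
-- what changed: Replaces the reverse-then-prepend-until-break loop and length comparison with a single forward enumerate pass recording the last index of 'materials', then a slice comps[last+1:].
import Mathlib
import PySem

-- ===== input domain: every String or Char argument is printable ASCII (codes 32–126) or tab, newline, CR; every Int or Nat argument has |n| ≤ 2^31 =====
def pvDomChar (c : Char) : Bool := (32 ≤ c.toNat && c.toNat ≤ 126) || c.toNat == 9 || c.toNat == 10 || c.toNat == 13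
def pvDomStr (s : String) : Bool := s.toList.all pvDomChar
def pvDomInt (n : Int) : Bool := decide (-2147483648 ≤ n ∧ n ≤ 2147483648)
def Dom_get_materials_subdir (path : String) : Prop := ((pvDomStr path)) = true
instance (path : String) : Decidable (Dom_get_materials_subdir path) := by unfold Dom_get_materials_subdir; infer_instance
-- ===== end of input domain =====

-- B replaces A's reverse + prepend-until-break with one forward pass recording the last
-- index of 'materials' and a slice; objective: simpler.

-- ===== PORT A =====
-- for p in comps: if p != 'materials': r.insert(0, p) else: break
def pvLoopA : List String → List String → List String
  | r, [] => r
  | r, p :: t => if p ≠ "materials" then pvLoopA (p :: r) t else r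

def get_materials_subdir (path : String) : Option String :=
  let path := PySem.Str.replace path "\\" "/"
  let comps := (PySem.Str.split? path "/").getD []   -- sep "/" is non-empty: split? is always some here
  let comps := comps.reverse
  let r := pvLoopA [] comps
  if r.length < comps.length then some (PySem.Str.join "/" r) else none

-- ===== PORT B =====
def get_materials_subdir_alt (path : String) : Option String :=
  let comps := (PySem.Str.split? (PySem.Str.replace path "\\" "/") "/").getD []
  let last := (PySem.List.enumerate comps).foldl
    (fun last ic => if ic.2 = "materials" then ic.1 else last) (-1 : Int)
  if last = -1 then none
  else some (PySem.Str.join "/" (PySem.List.slice comps (some (last + 1)) none))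

-- ===== PRECONDITION & SPEC =====
def Spec_get_materials_subdir (path : String) (out : Option String) : Prop := out = get_materials_subdir_alt path
instance (path : String) (out : Option String) : Decidable (Spec_get_materials_subdir path out) := by unfold Spec_get_materials_subdir; infer_instance

-- ===== CLAIM (what is proved, stated in full; the proofs are below) =====
def Claim_equal_get_materials_subdir : Prop := ∀ (path : String), Dom_get_materials_subdir path → Spec_get_materials_subdir path (get_materials_subdir path)

-- ===== LEMMAS AND PROOFS =====

-- A's loop with accumulator r: the result is the no-accumulator run followed by r.
theorem pvLoopA_acc (xs r : List String) : pvLoopA r xs = pvLoopA [] xs ++ r := by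
  induction xs generalizing r with
  | nil => simp [pvLoopA]
  | cons p t ih =>
    by_cases h : p = "materials"
    · simp [pvLoopA, h]
    · simp only [pvLoopA, if_pos (show p ≠ "materials" from h)]
      rw [ih (p :: r), ih [p]]
      simp

def pvLastB (l : List String) : Int :=
  (PySem.List.enumerate l).foldl (fun last ic => if ic.2 = "materials" then ic.1 else last) (-1 : Int)

def pvResA (l : List String) : List String := pvLoopA [] l.reverse

theorem pvLastB_concat (l : List String) (a : String) :
    pvLastB (l ++ [a]) = if a = "materials" then (l.length : Int) else pvLastB l := by
  unfold pvLastB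
  rw [PySem.List.enumerate_append, List.foldl_append]
  simp [PySem.List.enumerate]

theorem pvResA_concat (l : List String) (a : String) :
    pvResA (l ++ [a]) = if a = "materials" then [] else pvResA l ++ [a] := by
  unfold pvResA
  by_cases h : a = "materials"
  · rw [List.reverse_append]
    simp [pvLoopA, h]
  · have hstep : pvLoopA [] (a :: l.reverse) = pvLoopA [a] l.reverse := by
      simp [pvLoopA, h]
    rw [List.reverse_append, List.reverse_singleton, List.singleton_append, hstep,
      pvLoopA_acc, if_neg h]

-- Joint invariant relating A's collected suffix and B's last index.
theorem pv_invariant (l : List String) :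
    (("materials" ∈ l ∧ 0 ≤ pvLastB l ∧
        (pvLastB l).toNat + 1 + (pvResA l).length = l.length ∧
        l.drop ((pvLastB l).toNat + 1) = pvResA l)
      ∨ ("materials" ∉ l ∧ pvLastB l = -1 ∧ pvResA l = l)) := by
  induction l using List.reverseRecOn with
  | nil => right; exact ⟨by simp, by simp [pvLastB, PySem.List.enumerate], by simp [pvResA, pvLoopA]⟩
  | append_singleton l a ih =>
    by_cases h : a = "materials"
    · left
      refine ⟨by simp [h], ?_, ?_, ?_⟩ <;>
        simp [pvLastB_concat, pvResA_concat, h, List.drop_append]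
    · rcases ih with ⟨hm, h0, hlen, hdrop⟩ | ⟨hm, hlast, hres⟩
      · left
        have hle : (pvLastB l).toNat + 1 ≤ l.length := by omega
        refine ⟨by simp [hm], ?_, ?_, ?_⟩
        · simp [pvLastB_concat, h, h0]
        · simp [pvLastB_concat, pvResA_concat, h]; omega
        · rw [pvLastB_concat, if_neg h, pvResA_concat, if_neg h,
            List.drop_append_of_le_length hle, hdrop]
      · right
        refine ⟨?_, ?_, ?_⟩
        · simp only [List.mem_append, List.mem_singleton, not_or]
          exact ⟨hm, fun e => h e.symm⟩
        · simp [pvLastB_concat, h, hlast]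
        · simp [pvResA_concat, h, hres]

-- Common post-split computation: A's shape equals B's shape on every component list.
theorem pv_post_eq (l : List String) :
    (if (pvResA l).length < l.length then some (PySem.Str.join "/" (pvResA l)) else none)
      = (if pvLastB l = -1 then none
         else some (PySem.Str.join "/" (PySem.List.slice l (some (pvLastB l + 1)) none))) := by
  rcases pv_invariant l with ⟨hm, h0, hlen, hdrop⟩ | ⟨hm, hlast, hres⟩
  · have hne : pvLastB l ≠ -1 := by omega
    rw [if_pos (by omega), if_neg hne]
    have hslice : PySem.List.slice l (some (pvLastB l + 1)) none = pvResA l := by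
      rw [PySem.List.slice_from l (by omega)]
      have : (pvLastB l + 1).toNat = (pvLastB l).toNat + 1 := by omega
      rw [this, hdrop]
    rw [hslice]
  · rw [if_neg (by simp [hres]), if_pos hlast]

-- ===== VERDICT (by name: the statement is the Claim_ definition above) =====
theorem get_materials_subdir_spec : Claim_equal_get_materials_subdir := by
  intro path _
  unfold Spec_get_materials_subdir get_materials_subdir get_materials_subdir_alt
  simp only [List.length_reverse]
  exact pv_post_eq ((PySem.Str.split? (PySem.Str.replace path "\\" "/") "/").getD [])
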